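-- pv_equiv track=rewrite | github.com/YangLiyli131/Leetcode2020 | in_Python_v2/2000 Reverse Prefix of Word.py | reversePrefix
-- ===== SOURCE A (Python) =====
-- def reversePrefix(word, ch):
--     """
--     :type word: str
--     :type ch: str
--     :rtype: str
--     """
--     if ch not in word:
--         return word
--     idxx = 0
--     for idx, l in enumerate(word):
--         if l == ch:
--             idxx = idx
--             break
--     pre, nex = word[:idxx+1], word[idxx+1:]
--     return pre[::-1] + nex
-- ===== SOURCE B (Python) =====
-- def reversePrefix(word, ch):
--     chars = list(word)
--     j = None
--     for k, c in enumerate(chars):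
--         if c == ch:
--             j = k
--             break
--     if j is None:
--         return word
--     i = 0
--     while i < j:
--         chars[i], chars[j] = chars[j], chars[i]
--         i += 1
--         j -= 1
--     return ''.join(chars)
-- ===== Notes on version B (the rewrite author's own statement) =====
-- stated objective: alternative
-- what changed: B replaces A's substring test plus slice/concatenate (word[:i+1][::-1] + word[i+1:]) with an in-place two-pointer swap on a character list: find the first index of ch, then swap converging ends until the pointers meet, joining the list at the end.
import Mathlib
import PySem

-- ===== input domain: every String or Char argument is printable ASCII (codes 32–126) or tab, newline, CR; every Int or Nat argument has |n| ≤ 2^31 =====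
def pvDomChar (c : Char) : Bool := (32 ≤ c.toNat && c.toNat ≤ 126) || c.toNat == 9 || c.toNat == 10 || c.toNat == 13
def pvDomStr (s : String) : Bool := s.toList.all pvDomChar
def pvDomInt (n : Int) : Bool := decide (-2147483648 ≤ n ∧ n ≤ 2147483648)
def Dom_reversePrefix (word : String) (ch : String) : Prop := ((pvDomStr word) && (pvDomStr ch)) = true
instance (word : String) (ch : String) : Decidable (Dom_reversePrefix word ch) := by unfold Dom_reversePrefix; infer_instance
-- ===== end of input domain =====

-- B replaces A's slice/reverse/concatenate with a two-pointer in-place swap on a character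
-- list; objective: alternative (same O(n) cost, different structure). Equivalence of return
-- values is proved for all inputs (both programs are total).

-- ===== PORT A =====
-- 'for idx, l in enumerate(word): if l == ch: idxx = idx; break' — recursion over the
-- characters with the running enumerate index; 'l == ch' compares the 1-char string [l] to ch.
def aFirstIdx (chars : List Char) (ch : List Char) (idx : Nat) (idxx : Nat) : Nat :=
  match chars with
  | [] => idxx
  | l :: rest => if [l] = ch then idx else aFirstIdx rest ch (idx + 1) idxx

def reversePrefix (word : String) (ch : String) : String :=
  if ¬ PySem.Str.isIn ch word then word
  else
    let idxx := aFirstIdx word.toList ch.toList 0 0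
    let pre := PySem.List.slice word.toList none (some ((idxx : Int) + 1))
    let nex := PySem.List.slice word.toList (some ((idxx : Int) + 1)) none
    -- pre[::-1] is pre.reverse (PySem.List.slice?_none_none_neg_one)
    String.ofList (pre.reverse ++ nex)

-- ===== PORT B =====
-- 'for k, c in enumerate(chars): if c == ch: j = k; break' — first index whose character
-- equals ch (as a 1-char string), none if there is no such character.
def bFind (chars : List Char) (ch : List Char) (k : Nat) : Option Nat :=
  match chars with
  | [] => none
  | c :: rest => if [c] = ch then some k else bFind rest ch (k + 1)

-- 'while i < j: chars[i], chars[j] = chars[j], chars[i]; i += 1; j -= 1'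
def swapTP (chars : List Char) (i j : Nat) : List Char :=
  if i < j then
    swapTP
      (PySem.List.pySetD (PySem.List.pySetD chars (i : Int) (PySem.List.pyGetD chars (j : Int) ' '))
        (j : Int) (PySem.List.pyGetD chars (i : Int) ' '))
      (i + 1) (j - 1)
  else chars
termination_by j - i
decreasing_by omega

def reversePrefix_alt (word : String) (ch : String) : String :=
  let chars := word.toList
  match bFind chars ch.toList 0 with
  | none => word
  | some j => String.ofList (swapTP chars 0 j)

-- ===== PRECONDITION & SPEC =====
def Spec_reversePrefix (word : String) (ch : String) (out : String) : Prop := out = reversePrefix_alt word ch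
instance (word : String) (ch : String) (out : String) : Decidable (Spec_reversePrefix word ch out) := by unfold Spec_reversePrefix; infer_instance

-- ===== CLAIM (what is proved, stated in full; the proofs are below) =====
def Claim_equal_reversePrefix : Prop := ∀ (word : String) (ch : String), Dom_reversePrefix word ch → Spec_reversePrefix word ch (reversePrefix word ch)

-- ===== LEMMAS AND PROOFS =====

-- A's first-match loop leaves idxx untouched when B's search fails.
lemma aFirstIdx_of_bFind_none (chars ch : List Char) (k idxx : Nat)
    (h : bFind chars ch k = none) : aFirstIdx chars ch k idxx = idxx := by
  induction chars generalizing k with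
  | nil => rfl
  | cons c rest ih =>
    simp only [bFind] at h
    simp only [aFirstIdx]
    split_ifs with hc
    · simp [hc] at h
    · exact ih _ (by simpa [hc] using h)

-- A's first-match loop finds the same index as B's search when it succeeds.
lemma aFirstIdx_of_bFind_some (chars ch : List Char) (k j idxx : Nat)
    (h : bFind chars ch k = some j) : aFirstIdx chars ch k idxx = j := by
  induction chars generalizing k with
  | nil => simp [bFind] at h
  | cons c rest ih =>
    simp only [bFind] at h
    simp only [aFirstIdx]
    split_ifs with hc
    · simpa [hc] using h
    · exact ih _ (by simpa [hc] using h)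

-- Successful search: a decomposition of the list at the found index.
lemma bFind_some_decomp (chars ch : List Char) (j : Nat)
    (h : bFind chars ch 0 = some j) :
    ∃ (pre suf : List Char) (c : Char),
      chars = pre ++ c :: suf ∧ pre.length = j ∧ [c] = ch := by
  induction chars generalizing j with
  | nil => simp [bFind] at h
  | cons c rest ih =>
    simp only [bFind] at h
    by_cases hc : [c] = ch
    · refine ⟨[], rest, c, by simp, ?_, hc⟩
      simp [hc] at h
      simp only [List.length_nil]
      omega
    · have hshift : ∀ (l : List Char) (k : Nat),
          bFind l ch (k + 1) = (bFind l ch k).map (· + 1) := by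
        intro l
        induction l with
        | nil => intro k; rfl
        | cons x xs ihx =>
          intro k
          simp only [bFind]
          split_ifs with hx
          · rfl
          · exact ihx (k + 1)
      rw [if_neg hc, hshift rest 0] at h
      cases hrest : bFind rest ch 0 with
      | none => simp [hrest] at h
      | some j' =>
        simp [hrest] at h
        obtain ⟨pre, suf, c', hdec, hlen, hch⟩ := ih j' hrest
        exact ⟨c :: pre, suf, c', by simp [hdec], by simp [hlen]; omega, hch⟩

-- setting index P.length of P ++ x :: T
lemma pySetD_at_length (P T : List Char) (x v : Char) :
    PySem.List.pySetD (P ++ x :: T) ((P.length : Nat) : Int) v = P ++ v :: T := by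
  rw [PySem.List.pySetD_natCast]
  simp

lemma pyGetD_at_length (P T : List Char) (x d : Char) :
    PySem.List.pyGetD (P ++ x :: T) ((P.length : Nat) : Int) d = x := by
  rw [PySem.List.pyGetD_natCast]
  simp [List.getD]

-- The two-pointer swap loop reverses exactly the middle segment.
lemma swapTP_reverses (n : Nat) : ∀ (M P S : List Char), M.length ≤ n →
    swapTP (P ++ M ++ S) P.length (P.length + M.length - 1) = P ++ M.reverse ++ S := by
  induction n with
  | zero =>
    intro M P S hM
    have hMnil : M = [] := List.eq_nil_of_length_eq_zero (by omega)
    subst hMnil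
    rw [swapTP.eq_def, if_neg (by simp only [List.length_nil]; omega)]
    simp
  | succ n ih =>
    intro M P S hM
    match M with
    | [] =>
      rw [swapTP.eq_def, if_neg (by simp only [List.length_nil]; omega)]
      simp
    | [a] =>
      rw [swapTP.eq_def, if_neg (by simp only [List.length_singleton]; omega)]
      simp
    | a :: b :: M₂ =>
      rcases List.eq_nil_or_concat (b :: M₂) with h | ⟨M', z, hM'⟩
      · simp at h
      · rw [hM']
        have hij : P.length < P.length + (a :: M'.concat z).length - 1 := by
          simp only [List.length_cons, List.length_concat]; omega
        have hchars : P ++ (a :: M'.concat z) ++ S = P ++ a :: (M' ++ z :: S) := by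
          simp [List.concat_eq_append]
        have hchars2 : P ++ (a :: M'.concat z) ++ S = (P ++ a :: M') ++ z :: S := by
          simp [List.concat_eq_append]
        have hj : P.length + (a :: M'.concat z).length - 1 = (P ++ a :: M').length := by
          simp only [List.length_cons, List.length_concat, List.length_append]; omega
        have hgi : PySem.List.pyGetD (P ++ (a :: M'.concat z) ++ S) ((P.length : Nat) : Int) ' ' = a := by
          rw [hchars, pyGetD_at_length]
        have hgj : PySem.List.pyGetD (P ++ (a :: M'.concat z) ++ S)
            (((P.length + (a :: M'.concat z).length - 1 : Nat)) : Int) ' ' = z := by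
          rw [hj, hchars2, pyGetD_at_length]
        have hset : PySem.List.pySetD
            (PySem.List.pySetD (P ++ (a :: M'.concat z) ++ S) ((P.length : Nat) : Int)
              (PySem.List.pyGetD (P ++ (a :: M'.concat z) ++ S)
                (((P.length + (a :: M'.concat z).length - 1 : Nat)) : Int) ' '))
            (((P.length + (a :: M'.concat z).length - 1 : Nat)) : Int)
            (PySem.List.pyGetD (P ++ (a :: M'.concat z) ++ S) ((P.length : Nat) : Int) ' ')
            = (P ++ [z]) ++ M' ++ (a :: S) := by
          rw [hgi, hgj, hchars, pySetD_at_length]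
          have h1 : P ++ z :: (M' ++ z :: S) = (P ++ z :: M') ++ z :: S := by simp
          rw [h1, hj]
          have hlen2 : (P ++ a :: M').length = (P ++ z :: M').length := by simp
          rw [hlen2, pySetD_at_length]
          simp
        rw [swapTP.eq_def, if_pos hij, hset]
        have h1 : P.length + 1 = (P ++ [z]).length := by simp
        have h2 : P.length + (a :: M'.concat z).length - 1 - 1
            = (P ++ [z]).length + M'.length - 1 := by
          simp only [List.length_cons, List.length_concat, List.length_append,
            List.length_nil]
          omega
        have hM'len : M'.length ≤ n := by
          have hcz : (M'.concat z).length = M₂.length + 1 := by rw [← hM']; simp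
          simp only [List.length_concat] at hcz
          simp only [List.length_cons] at hM
          omega
        rw [h1, h2, ih M' (P ++ [z]) (a :: S) hM'len]
        simp [List.concat_eq_append]

-- a single character of the word is a substring
lemma isIn_of_mem (c : Char) (word ch : String)
    (hch : [c] = ch.toList) (hmem : c ∈ word.toList) :
    PySem.Str.isIn ch word = true := by
  rw [PySem.Str.isIn_iff_infix, ← hch]
  obtain ⟨s, t, hst⟩ := List.append_of_mem hmem
  exact ⟨s, t, by simp [hst]⟩

-- ===== VERDICT (by name: the statement is the Claim_ definition above) =====
theorem reversePrefix_spec : Claim_equal_reversePrefix := by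
  intro word ch _
  unfold Spec_reversePrefix reversePrefix reversePrefix_alt
  cases hf : bFind word.toList ch.toList 0 with
  | none =>
    simp only [hf]
    by_cases h : PySem.Str.isIn ch word = true
    · -- ch occurs as a substring but no single character equals it: idxx stays 0
      rw [if_neg (by simpa using h)]
      rw [aFirstIdx_of_bFind_none _ _ _ _ hf]
      have h0 : ((0 : Nat) : Int) + 1 = ((1 : Nat) : Int) := by norm_num
      rw [h0, PySem.List.slice_to_natCast, PySem.List.slice_from_natCast]
      have hrev : (word.toList.take 1).reverse = word.toList.take 1 := by
        cases word.toList with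
        | nil => rfl
        | cons c rest => simp
      rw [hrev, List.take_append_drop]
      exact String.ofList_toList
    · rw [if_pos (by simpa using h)]
  | some j =>
    obtain ⟨pre, suf, c, hdec, hlen, hch⟩ := bFind_some_decomp _ _ _ hf
    have hin : PySem.Str.isIn ch word = true :=
      isIn_of_mem c word ch hch (by rw [hdec]; simp)
    simp only [hf]
    rw [if_neg (by simpa using hin)]
    rw [aFirstIdx_of_bFind_some _ _ _ _ _ hf]
    have hjlen : (j : Int) + 1 = ((j + 1 : Nat) : Int) := by push_cast; ring
    rw [hjlen, PySem.List.slice_to_natCast, PySem.List.slice_from_natCast]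
    have hM : word.toList.take (j + 1) = pre ++ [c] := by
      rw [hdec, ← hlen]
      simp [List.take_append]
    have hlenM : (word.toList.take (j + 1)).length = j + 1 := by
      rw [hM]; simp only [List.length_append, List.length_singleton]; omega
    have hsplit : word.toList = [] ++ (word.toList.take (j + 1)) ++ (word.toList.drop (j + 1)) := by
      simp
    have hswap := swapTP_reverses (j + 1) (word.toList.take (j + 1)) [] (word.toList.drop (j + 1))
      (by omega)
    rw [← hsplit] at hswap
    simp only [List.length_nil, hlenM] at hswap
    have hj0 : (0 : Nat) + (j + 1) - 1 = j := by omega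
    rw [hj0] at hswap
    rw [hswap]
    simp
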